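-- pv_equiv track=rewrite | github.com/dreamhigh0525/tensorflow | tensorflow/python/feature_column/feature_column.py | _shape_offsets
-- ===== SOURCE A (Python) =====
-- def _shape_offsets(shape):
--   """Returns moving offset for each dimension given shape."""
--   offsets = []
--   for dim in reversed(shape):
--     if offsets:
--       offsets.append(dim * offsets[-1])
--     else:
--       offsets.append(dim)
--   offsets.reverse()
--   return offsets
-- ===== SOURCE B (Python) =====
-- def _shape_offsets(shape):
--   """Returns moving offset for each dimension given shape."""
--   def tail_prod(i):
--     p = 1
--     for d in shape[i:]:
--       p *= d
--     return p
--   return [tail_prod(i) for i in range(len(shape))]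
-- ===== Notes on version B (the rewrite author's own statement) =====
-- stated objective: alternative
-- what changed: Replaces the reversed-accumulation loop plus in-place reverse with a forward list comprehension that computes each offset independently as the product of the tail slice shape[i:].
import Mathlib
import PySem

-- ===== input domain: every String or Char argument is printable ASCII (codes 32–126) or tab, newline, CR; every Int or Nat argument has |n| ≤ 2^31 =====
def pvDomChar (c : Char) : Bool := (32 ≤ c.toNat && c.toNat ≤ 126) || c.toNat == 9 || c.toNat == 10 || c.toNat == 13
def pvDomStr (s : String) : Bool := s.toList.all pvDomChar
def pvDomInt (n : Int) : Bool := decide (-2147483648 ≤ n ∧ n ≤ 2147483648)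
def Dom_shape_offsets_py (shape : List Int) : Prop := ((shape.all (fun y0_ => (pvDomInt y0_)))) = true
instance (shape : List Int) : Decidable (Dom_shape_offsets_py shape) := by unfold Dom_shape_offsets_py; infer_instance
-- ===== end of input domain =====

-- B replaces A's reversed accumulation + in-place reverse with a forward comprehension
-- computing each offset independently as the product of the tail slice (objective: alternative).

-- ===== PORT A =====
-- the loop body: append dim * offsets[-1] if offsets is nonempty, else append dim
def shape_offsets_py_step (offsets : List Int) (dim : Int) : List Int :=
  match offsets.getLast? with
  | some last => offsets ++ [dim * last]
  | none => offsets ++ [dim]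

def shape_offsets_py (shape : List Int) : List Int :=
  (shape.reverse.foldl shape_offsets_py_step []).reverse

-- ===== PORT B =====
-- tail_prod i: product of shape[i:] accumulated left to right starting from 1
def shape_offsets_py_tail_prod (shape : List Int) (i : Nat) : Int :=
  (shape.drop i).foldl (· * ·) 1

def shape_offsets_py_alt (shape : List Int) : List Int :=
  (List.range shape.length).map (shape_offsets_py_tail_prod shape)

-- ===== PRECONDITION & SPEC =====
def Spec_shape_offsets_py (shape : List Int) (out : List Int) : Prop := out = shape_offsets_py_alt shape
instance (shape : List Int) (out : List Int) : Decidable (Spec_shape_offsets_py shape out) := by unfold Spec_shape_offsets_py; infer_instance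

-- ===== CLAIM (what is proved, stated in full; the proofs are below) =====
def Claim_equal_shape_offsets_py : Prop := ∀ (shape : List Int), Dom_shape_offsets_py shape → Spec_shape_offsets_py shape (shape_offsets_py shape)

-- ===== LEMMAS AND PROOFS =====

theorem foldl_mul_shift (a : Int) (l : List Int) :
    l.foldl (· * ·) a = a * l.foldl (· * ·) 1 := by
  induction l generalizing a with
  | nil => simp
  | cons x xs ih =>
      simp only [List.foldl_cons]
      rw [ih (a * x), ih (1 * x)]
      ring

theorem shape_offsets_py_alt_cons (x : Int) (shape : List Int) :
    shape_offsets_py_alt (x :: shape)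
      = (x * shape.foldl (· * ·) 1) :: shape_offsets_py_alt shape := by
  unfold shape_offsets_py_alt
  rw [List.length_cons, List.range_succ_eq_map, List.map_cons, List.map_map]
  have h1 : shape_offsets_py_tail_prod (x :: shape) 0 = x * shape.foldl (· * ·) 1 := by
    simp only [shape_offsets_py_tail_prod, List.drop_zero, List.foldl_cons]
    rw [foldl_mul_shift (1 * x)]
    ring
  have h2 : List.map (shape_offsets_py_tail_prod (x :: shape) ∘ Nat.succ) (List.range shape.length)
      = List.map (shape_offsets_py_tail_prod shape) (List.range shape.length) :=
    List.map_congr_left (fun i _ => by simp [shape_offsets_py_tail_prod, Function.comp])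
  rw [h1, h2]

theorem step_eq_of_last (l : List Int) (d p : Int) (h : l.getLast? = some p) :
    shape_offsets_py_step l d = l ++ [d * p] := by
  unfold shape_offsets_py_step
  rw [h]

theorem ports_agree (shape : List Int) :
    shape_offsets_py shape = shape_offsets_py_alt shape := by
  induction shape with
  | nil => rfl
  | cons x xs ih =>
    rw [shape_offsets_py_alt_cons]
    unfold shape_offsets_py at ih ⊢
    rw [List.reverse_cons, List.foldl_append, List.foldl_cons, List.foldl_nil]
    cases xs with
    | nil =>
        simp [shape_offsets_py_step, shape_offsets_py_alt]
    | cons y ys =>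
      have hlast : ((y :: ys).reverse.foldl shape_offsets_py_step []).getLast?
          = (shape_offsets_py_alt (y :: ys)).head? := by
        rw [← List.head?_reverse, ih]
      have hhead : (shape_offsets_py_alt (y :: ys)).head?
          = some ((y :: ys).foldl (· * ·) 1) := by
        simp [shape_offsets_py_alt, shape_offsets_py_tail_prod, List.range_succ_eq_map]
      rw [step_eq_of_last _ x _ (hlast.trans hhead)]
      simp only [List.reverse_append, List.reverse_cons, List.reverse_nil,
        List.nil_append, List.cons_append]
      rw [show ys.reverse ++ [y] = (y :: ys).reverse from (List.reverse_cons (as := ys) (a := y)).symm, ih]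

-- ===== VERDICT (by name: the statement is the Claim_ definition above) =====
theorem shape_offsets_py_spec : Claim_equal_shape_offsets_py := by
  intro shape _
  exact ports_agree shape
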